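-- pv_equiv track=rewrite | github.com/ByStanderApp/ByStander | ml/llm_evaluation/analyze_evaluation_scores.py | build_group_buckets
-- ===== SOURCE A (Python) =====
-- from typing import Any
--
-- PROMPT_STYLES = ('panic', 'calm', 'misspelled')
--
-- def normalize_text(value: Any) -> str:
--     return str(value or '').strip()
--
-- def build_group_buckets(results: list[dict[str, Any]]) -> dict[tuple[str, str], list[dict[str, Any]]]:
--     buckets: dict[tuple[str, str], list[dict[str, Any]]] = {('overall', 'all'): list(results)}
--     for style in PROMPT_STYLES:
--         buckets[('prompt_style', style)] = [
--             item for item in results if normalize_text(item.get('prompt_style')).lower() == style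
--         ]
--     buckets[('severity_group', 'critical')] = [
--         item for item in results if normalize_text(item.get('severity')).lower() == 'critical'
--     ]
--     buckets[('severity_group', 'non-critical')] = [
--         item for item in results if normalize_text(item.get('severity')).lower() != 'critical'
--     ]
--     return buckets
-- ===== SOURCE B (Python) =====
-- from typing import Any
--
-- PROMPT_STYLES = ('panic', 'calm', 'misspelled')
--
-- def normalize_text(value: Any) -> str:
--     return str(value or '').strip()
--
-- def build_group_buckets(results: list[dict[str, Any]]) -> dict[tuple[str, str], list[dict[str, Any]]]:
--     # One pass over results with five accumulators instead of six filtering passes.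
--     panic, calm, misspelled, crit, noncrit = [], [], [], [], []
--     for item in results:
--         s = normalize_text(item.get('prompt_style')).lower()
--         if s == 'panic':
--             panic.append(item)
--         elif s == 'calm':
--             calm.append(item)
--         elif s == 'misspelled':
--             misspelled.append(item)
--         if normalize_text(item.get('severity')).lower() == 'critical':
--             crit.append(item)
--         else:
--             noncrit.append(item)
--     return {
--         ('overall', 'all'): list(results),
--         ('prompt_style', 'panic'): panic,
--         ('prompt_style', 'calm'): calm,
--         ('prompt_style', 'misspelled'): misspelled,
--         ('severity_group', 'critical'): crit,
--         ('severity_group', 'non-critical'): noncrit,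
--     }
-- ===== Notes on version B (the rewrite author's own statement) =====
-- stated objective: simpler
-- what changed: B makes a single pass over results with five explicit accumulators instead of A's six separate filtering passes (one list comprehension per bucket), normalizing each item's style and severity once.
import Mathlib
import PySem

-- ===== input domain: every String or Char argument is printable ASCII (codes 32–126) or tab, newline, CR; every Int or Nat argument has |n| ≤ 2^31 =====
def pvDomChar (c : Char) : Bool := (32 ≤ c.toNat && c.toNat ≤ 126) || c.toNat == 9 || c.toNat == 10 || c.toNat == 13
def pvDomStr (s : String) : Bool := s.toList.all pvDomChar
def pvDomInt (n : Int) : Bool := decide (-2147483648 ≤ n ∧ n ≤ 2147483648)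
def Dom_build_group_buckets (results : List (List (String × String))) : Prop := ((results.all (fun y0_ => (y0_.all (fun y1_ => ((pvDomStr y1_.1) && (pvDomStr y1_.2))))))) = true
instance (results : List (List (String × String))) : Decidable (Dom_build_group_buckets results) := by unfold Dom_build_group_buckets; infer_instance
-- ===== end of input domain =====

-- B: one pass over results with five accumulators instead of A's six filtering passes (objective: simpler).

-- ===== PORT A =====
-- shared module helper: normalize_text(value) = str(value or '').strip()
-- ('value or ""' on an Option String is getD "": None → "", and "" or "" = "")
def normalize_text (value : Option String) : String :=
  PySem.Str.strip (value.getD "")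

def PROMPT_STYLES : List String := ["panic", "calm", "misspelled"]

def build_group_buckets (results : List (List (String × String))) :
    List (String × String × List (List (String × String))) :=
  -- dict with tuple keys is flattened to (String × String × value) per the type convention
  let buckets := [(("overall" : String), ("all" : String), results)]
  let buckets := PROMPT_STYLES.foldl (fun b style =>
    b ++ [("prompt_style", style,
      results.filter (fun item =>
        PySem.Str.lower (normalize_text (PySem.Dict.get? (PySem.Dict.mk item) "prompt_style")) == style))]) buckets
  let buckets := buckets ++ [("severity_group", "critical",
    results.filter (fun item =>
      PySem.Str.lower (normalize_text (PySem.Dict.get? (PySem.Dict.mk item) "severity")) == "critical"))]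
  let buckets := buckets ++ [("severity_group", "non-critical",
    results.filter (fun item =>
      !(PySem.Str.lower (normalize_text (PySem.Dict.get? (PySem.Dict.mk item) "severity")) == "critical")))]
  buckets

-- ===== PORT B =====
def pvStepB (acc : List (List (String × String)) × List (List (String × String)) ×
      List (List (String × String)) × List (List (String × String)) × List (List (String × String)))
    (item : List (String × String)) :
    List (List (String × String)) × List (List (String × String)) ×
      List (List (String × String)) × List (List (String × String)) × List (List (String × String)) :=
  let (panic, calm, misspelled, crit, noncrit) := acc
  let s := PySem.Str.lower (normalize_text (PySem.Dict.get? (PySem.Dict.mk item) "prompt_style"))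
  let (panic, calm, misspelled) :=
    if s == "panic" then (panic ++ [item], calm, misspelled)
    else if s == "calm" then (panic, calm ++ [item], misspelled)
    else if s == "misspelled" then (panic, calm, misspelled ++ [item])
    else (panic, calm, misspelled)
  if PySem.Str.lower (normalize_text (PySem.Dict.get? (PySem.Dict.mk item) "severity")) == "critical" then
    (panic, calm, misspelled, crit ++ [item], noncrit)
  else
    (panic, calm, misspelled, crit, noncrit ++ [item])

def build_group_buckets_alt (results : List (List (String × String))) :
    List (String × String × List (List (String × String))) :=
  let st := results.foldl pvStepB ([], [], [], [], [])
  let (panic, calm, misspelled, crit, noncrit) := st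
  [("overall", "all", results),
   ("prompt_style", "panic", panic),
   ("prompt_style", "calm", calm),
   ("prompt_style", "misspelled", misspelled),
   ("severity_group", "critical", crit),
   ("severity_group", "non-critical", noncrit)]

-- ===== PRECONDITION & SPEC =====
def Spec_build_group_buckets (results : List (List (String × String))) (out : List (String × String × List (List (String × String)))) : Prop := out = build_group_buckets_alt results
instance (results : List (List (String × String))) (out : List (String × String × List (List (String × String)))) : Decidable (Spec_build_group_buckets results out) := by unfold Spec_build_group_buckets; infer_instance

-- ===== CLAIM (what is proved, stated in full; the proofs are below) =====
def Claim_equal_build_group_buckets : Prop := ∀ (results : List (List (String × String))), Dom_build_group_buckets results → Spec_build_group_buckets results (build_group_buckets results)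

-- ===== LEMMAS AND PROOFS =====
-- B's single fold with five accumulators computes the five filters A builds in separate passes
theorem foldl_pvStepB (l : List (List (String × String)))
    (p c m cr nc : List (List (String × String))) :
    l.foldl pvStepB (p, c, m, cr, nc) =
      (p ++ l.filter (fun it => PySem.Str.lower (normalize_text (PySem.Dict.get? (PySem.Dict.mk it) "prompt_style")) == "panic"),
       c ++ l.filter (fun it => PySem.Str.lower (normalize_text (PySem.Dict.get? (PySem.Dict.mk it) "prompt_style")) == "calm"),
       m ++ l.filter (fun it => PySem.Str.lower (normalize_text (PySem.Dict.get? (PySem.Dict.mk it) "prompt_style")) == "misspelled"),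
       cr ++ l.filter (fun it => PySem.Str.lower (normalize_text (PySem.Dict.get? (PySem.Dict.mk it) "severity")) == "critical"),
       nc ++ l.filter (fun it => !(PySem.Str.lower (normalize_text (PySem.Dict.get? (PySem.Dict.mk it) "severity")) == "critical"))) := by
  induction l generalizing p c m cr nc with
  | nil => simp
  | cons hd tl ih =>
    simp only [List.foldl_cons, pvStepB]
    split_ifs <;> rw [ih] <;> simp_all

-- ===== VERDICT (by name: the statement is the Claim_ definition above) =====
theorem build_group_buckets_spec : Claim_equal_build_group_buckets := by
  intro results _
  unfold Spec_build_group_buckets build_group_buckets build_group_buckets_alt PROMPT_STYLES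
  rw [foldl_pvStepB]
  simp
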